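-- pv_equiv track=rewrite | github.com/soniaarora/Algorithms-Practice | Python/CodingPractice/LeetCode/arrays/junglebook.py | jungleBook1
-- ===== SOURCE A (Python) =====
-- from collections import defaultdict
--
-- def jungleBook1(predators):
--     map = makeMap(predators)
--     queue = []
--     queue = queue + map[-1]
--     totalCount = 0
--     while len(queue) > 0:
--         totalCount += 1
--         size = len(queue)
--         while size > 0:
--             ele = queue.pop(0)
--             if ele in map:
--                 queue = queue + map[ele]
--             size -= 1
--     return totalCount
--
-- def makeMap(predators):
--     map = defaultdict(list)
--     for i, ele in enumerate(predators):
--         map[ele].append(i)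
--     return map
-- ===== SOURCE B (Python) =====
-- def jungleBook1(predators):
--     # Alternative algorithm: treat `predators` as a parent array and, for each
--     # index, walk upward toward the root -1, bounding the walk by n steps so
--     # cycles / chains that never reach -1 contribute 0; the answer is the
--     # maximum depth reached (= number of BFS levels of A).
--     n = len(predators)
--     best = 0
--     for i in range(n):
--         cur = i
--         depth = 1
--         ok = False
--         for _ in range(n):
--             p = predators[cur]
--             if p == -1:
--                 ok = True
--                 break
--             if p < 0 or p >= n:
--                 break
--             cur = p
--             depth += 1
--         if ok and depth > best:
--             best = depth
--     return best
-- ===== Notes on version B (the rewrite author's own statement) =====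
-- stated objective: alternative
-- what changed: A builds a child-adjacency dict and counts BFS levels from the root -1 with a FIFO queue; B instead treats predators directly as a parent array and, for each index, walks upward toward -1 (bounded by n steps so cycles and out-of-range parents contribute 0), returning the maximum walk length.
import Mathlib
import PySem

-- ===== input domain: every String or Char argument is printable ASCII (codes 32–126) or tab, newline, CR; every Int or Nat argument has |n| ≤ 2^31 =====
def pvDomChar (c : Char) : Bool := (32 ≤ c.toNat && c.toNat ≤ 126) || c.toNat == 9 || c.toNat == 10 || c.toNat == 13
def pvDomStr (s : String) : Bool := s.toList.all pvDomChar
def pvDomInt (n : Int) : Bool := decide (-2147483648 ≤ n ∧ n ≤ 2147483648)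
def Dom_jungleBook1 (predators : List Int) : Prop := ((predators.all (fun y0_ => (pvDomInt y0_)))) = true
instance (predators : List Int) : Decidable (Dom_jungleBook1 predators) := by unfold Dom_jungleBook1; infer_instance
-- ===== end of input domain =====

-- B replaces A's level-by-level BFS from the root -1 by per-index upward walks
-- through the parent array, taking the maximum walk length (objective: alternative).

-- ===== PORT A =====
-- makeMap: defaultdict(list); for i, ele in enumerate(predators): map[ele].append(i)
def makeMap (predators : List Int) : PySem.Dict Int (List Int) :=
  (PySem.List.enumerate predators).foldl
    (fun m p => m.modify p.2 [] (fun l => l ++ [p.1])) PySem.Dict.empty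

-- inner `while size > 0`: ele = queue.pop(0); if ele in map: queue = queue + map[ele]
-- (the [] branch is unreachable: A only runs this with size = len(queue))
def jbInner (m : PySem.Dict Int (List Int)) : Nat → List Int → List Int
  | 0, queue => queue
  | size + 1, queue =>
    match queue with
    | [] => []
    | ele :: rest =>
      jbInner m size (if m.contains ele then rest ++ m.getD ele [] else rest)

-- outer `while len(queue) > 0`, accumulating totalCount; the fuel n+1 passed
-- below is proved sufficient (lemma jbOuter_eq: the loop runs at most n times)
def jbOuter (m : PySem.Dict Int (List Int)) : Nat → List Int → Int
  | 0, _ => 0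
  | fuel + 1, queue =>
    if queue.length > 0 then 1 + jbOuter m fuel (jbInner m queue.length queue)
    else 0

def jungleBook1 (predators : List Int) : Int :=
  let map := makeMap predators
  let queue : List Int := [] ++ map.getD (-1) []
  jbOuter map (predators.length + 1) queue

-- ===== PORT B =====
-- inner `for _ in range(n)` walk of Source B: some depth when the walk reaches -1,
-- none on a break out of range / fuel exhausted (cycle); `cur` is always a
-- valid index here, so pyGetD-with-default-0 is exactly predators[cur]
def bWalk (predators : List Int) : Nat → Int → Int → Option Int
  | 0, _, _ => none
  | f + 1, cur, depth =>
    let p := PySem.List.pyGetD predators cur 0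
    if p = -1 then some depth
    else if p < 0 ∨ (predators.length : Int) ≤ p then none
    else bWalk predators f p (depth + 1)

def jungleBook1_alt (predators : List Int) : Int :=
  (List.range predators.length).foldl
    (fun (best : Int) (i : Nat) =>
      match bWalk predators predators.length (i : Int) 1 with
      | some depth => if depth > best then depth else best
      | none => best) 0

-- ===== PRECONDITION & SPEC =====
def Spec_jungleBook1 (predators : List Int) (out : Int) : Prop := out = jungleBook1_alt predators
instance (predators : List Int) (out : Int) : Decidable (Spec_jungleBook1 predators out) := by unfold Spec_jungleBook1; infer_instance

-- ===== CLAIM (what is proved, stated in full; the proofs are below) =====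
def Claim_equal_jungleBook1 : Prop := ∀ (predators : List Int), Dom_jungleBook1 predators → Spec_jungleBook1 predators (jungleBook1 predators)

-- ===== LEMMAS AND PROOFS =====

-- `chainP preds k i` : index i's parent chain reaches -1 after exactly k upward steps
def chainP (preds : List Int) : Nat → Int → Prop
  | 0, i => 0 ≤ i ∧ i < preds.length ∧ PySem.List.pyGetD preds i 0 = -1
  | k + 1, i => 0 ≤ i ∧ i < preds.length ∧ chainP preds k (PySem.List.pyGetD preds i 0)

def iterGet (preds : List Int) : Nat → Int → Int
  | 0, i => i
  | j + 1, i => iterGet preds j (PySem.List.pyGetD preds i 0)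

-- BFS level sets of A
def Lev (preds : List Int) : Nat → List Int
  | 0 => (makeMap preds).getD (-1) []
  | k + 1 => (Lev preds k).flatMap (fun e => (makeMap preds).getD e [])

-- B's result as a running max over the walk values
def bbD (preds : List Int) : Int :=
  (List.range preds.length).foldl
    (fun (acc : Int) (j : Nat) => max acc ((bWalk preds preds.length (j : Int) 1).getD 0)) 0

lemma children_mem (preds : List Int) (c i : Int) :
    i ∈ (makeMap preds).getD c [] ↔ 0 ≤ i ∧ i < preds.length ∧ PySem.List.pyGetD preds i 0 = c := by
  have h1 : makeMap preds
      = ((PySem.List.enumerate preds).map (fun q => (q.2, q.1))).foldl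
          (fun m p => m.modify p.1 [] (fun l => l ++ [p.2])) PySem.Dict.empty := by
    rw [List.foldl_map]; rfl
  rw [h1, PySem.Dict.getD_foldl_modify_append]
  rw [PySem.List.enumerate_eq_map_pyRange preds 0]
  simp only [List.map_map, PySem.Dict.getD_empty, List.nil_append, List.mem_map,
    List.mem_filter, List.mem_map, Function.comp, PySem.List.mem_pyRange_one, beq_iff_eq]
  constructor
  · rintro ⟨⟨j, pj⟩, ⟨⟨j', ⟨hj1, hj2⟩, hq⟩, hc⟩, rfl⟩
    simp only [Prod.mk.injEq] at hq
    obtain ⟨h2, h1⟩ := hq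
    subst h1 h2
    simp only at hc ⊢
    refine ⟨hj1, ?_, hc⟩
    simpa [PySem.List.len] using hj2
  · rintro ⟨h0, hn, hc⟩
    refine ⟨(PySem.List.pyGetD preds i 0, i), ⟨⟨i, ⟨h0, by simpa [PySem.List.len] using hn⟩, rfl⟩, hc⟩, rfl⟩

lemma chainP_bounds {preds : List Int} {k : Nat} {i : Int} (h : chainP preds k i) :
    0 ≤ i ∧ i < preds.length := by
  cases k <;> exact ⟨h.1, h.2.1⟩

lemma mem_Lev (preds : List Int) (k : Nat) (i : Int) :
    i ∈ Lev preds k ↔ chainP preds k i := by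
  induction k generalizing i with
  | zero => exact children_mem preds (-1) i
  | succ k ih =>
    simp only [Lev, List.mem_flatMap, children_mem, chainP, ih]
    constructor
    · rintro ⟨e, he, h0, hn, hc⟩
      exact ⟨h0, hn, hc ▸ he⟩
    · rintro ⟨h0, hn, hc⟩
      exact ⟨_, hc, h0, hn, rfl⟩

lemma chainP_unique {preds : List Int} : ∀ {k m : Nat} {i : Int},
    chainP preds k i → chainP preds m i → k = m := by
  intro k
  induction k with
  | zero =>
    intro m i hk hm
    cases m with
    | zero => rfl
    | succ m =>
      exfalso
      have h1 := hk.2.2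
      have h2 := (chainP_bounds hm.2.2).1
      omega
  | succ k ih =>
    intro m i hk hm
    cases m with
    | zero =>
      exfalso
      have h1 := hm.2.2
      have h2 := (chainP_bounds hk.2.2).1
      omega
    | succ m => exact congrArg Nat.succ (ih hk.2.2 hm.2.2)

lemma chainP_iterGet {preds : List Int} : ∀ (j : Nat) {k : Nat} {i : Int},
    chainP preds k i → j ≤ k → chainP preds (k - j) (iterGet preds j i) := by
  intro j
  induction j with
  | zero => intro k i h _; simpa [iterGet]
  | succ j ih =>
    intro k i h hj
    cases k with
    | zero => omega
    | succ k =>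
      have : k + 1 - (j + 1) = k - j := by omega
      rw [this, iterGet]
      exact ih h.2.2 (by omega)

lemma chainP_lt_length {preds : List Int} {k : Nat} {i : Int}
    (h : chainP preds k i) : k < preds.length := by
  set L : List Nat := (List.range (k + 1)).map (fun j => (iterGet preds j i).toNat) with hL
  have hval : ∀ j, j ≤ k → chainP preds (k - j) (iterGet preds j i) :=
    fun j hj => chainP_iterGet j h hj
  have hnd : L.Nodup := by
    rw [hL]
    refine (List.nodup_map_iff_inj_on (List.nodup_range)).mpr ?_
    intro a ha b hb hab
    rw [List.mem_range] at ha hb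
    have hca := hval a (by omega)
    have hcb := hval b (by omega)
    have h0a := (chainP_bounds hca).1
    have h0b := (chainP_bounds hcb).1
    have : iterGet preds a i = iterGet preds b i := by omega
    have := chainP_unique hca (this ▸ hcb)
    omega
  have hsub : L ⊆ List.range preds.length := by
    intro x hx
    rw [hL, List.mem_map] at hx
    obtain ⟨j, hj, rfl⟩ := hx
    rw [List.mem_range] at hj
    have hc := hval j (by omega)
    have := chainP_bounds hc
    rw [List.mem_range]
    omega
  have := (List.Nodup.subperm hnd hsub).length_le
  simpa [hL] using this

lemma chainP_descend {preds : List Int} : ∀ {m : Nat} {i : Int},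
    chainP preds m i → ∀ k ≤ m, ∃ x, chainP preds k x := by
  intro m
  induction m with
  | zero => intro i h k hk; interval_cases k; exact ⟨i, h⟩
  | succ m ih =>
    intro i h k hk
    rcases Nat.eq_or_lt_of_le hk with rfl | hlt
    · exact ⟨i, h⟩
    · exact ih h.2.2 k (by omega)

lemma bWalk_some {preds : List Int} : ∀ (k : Nat) (f : Nat) (i d : Int),
    k < f → chainP preds k i → bWalk preds f i d = some (d + k) := by
  intro k
  induction k with
  | zero =>
    intro f i d hf h
    cases f with
    | zero => omega
    | succ f => simp [bWalk, h.2.2]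
  | succ k ih =>
    intro f i d hf h
    cases f with
    | zero => omega
    | succ f =>
      have hb := chainP_bounds h.2.2
      have hne : ¬ PySem.List.pyGetD preds i 0 = -1 := by omega
      have hr : ¬ (PySem.List.pyGetD preds i 0 < 0 ∨ (preds.length : Int) ≤ PySem.List.pyGetD preds i 0) := by omega
      simp only [bWalk, hne, hr, if_false]
      rw [ih f _ (d + 1) (by omega) h.2.2]
      congr 1
      push_cast
      ring

lemma bWalk_none {preds : List Int} : ∀ (f : Nat) (i d : Int),
    0 ≤ i → i < preds.length → (∀ k, ¬ chainP preds k i) →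
    bWalk preds f i d = none := by
  intro f
  induction f with
  | zero => intro i d _ _ _; rfl
  | succ f ih =>
    intro i d h0 hn hno
    have hne : ¬ PySem.List.pyGetD preds i 0 = -1 := fun h => hno 0 ⟨h0, hn, h⟩
    rw [bWalk]
    rw [if_neg hne]
    by_cases hr : PySem.List.pyGetD preds i 0 < 0 ∨ (preds.length : Int) ≤ PySem.List.pyGetD preds i 0
    · rw [if_pos hr]
    · rw [if_neg hr]
      push_neg at hr
      exact ih _ _ hr.1 hr.2 (fun k hk => hno (k + 1) ⟨h0, hn, hk⟩)

lemma wval_spec (preds : List Int) (j : Nat) (hj : j < preds.length) :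
    (∃ k, chainP preds k (j : Int) ∧ (bWalk preds preds.length (j : Int) 1).getD 0 = (k : Int) + 1) ∨
    ((∀ k, ¬ chainP preds k (j : Int)) ∧ (bWalk preds preds.length (j : Int) 1).getD 0 = 0) := by
  by_cases h : ∃ k, chainP preds k (j : Int)
  · obtain ⟨k, hk⟩ := h
    left
    refine ⟨k, hk, ?_⟩
    rw [bWalk_some k preds.length _ 1 (chainP_lt_length hk) hk]
    simp [add_comm]
  · push_neg at h
    right
    refine ⟨h, ?_⟩
    rw [bWalk_none preds.length _ 1 (by positivity) (by exact_mod_cast hj) h]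
    rfl

lemma fold_eq (preds : List Int) : ∀ (l : List Nat) (b : Int), 0 ≤ b →
    l.foldl (fun (best : Int) (i : Nat) =>
      match bWalk preds preds.length (i : Int) 1 with
      | some depth => if depth > best then depth else best
      | none => best) b
    = l.foldl (fun (acc : Int) (j : Nat) => max acc ((bWalk preds preds.length (j : Int) 1).getD 0)) b := by
  intro l
  induction l with
  | nil => intro b _; rfl
  | cons j t ih =>
    intro b hb
    rw [List.foldl_cons, List.foldl_cons]
    cases hw : bWalk preds preds.length (j : Int) 1 with
    | none =>
      simp only [Option.getD_none]
      rw [max_eq_left hb]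
      exact ih b hb
    | some d =>
      simp only [Option.getD_some]
      have h1 : max b d = (if d > b then d else b) := by
        rcases max_cases b d with ⟨h1, h2⟩ | ⟨h1, h2⟩ <;> split <;> omega
      rw [h1]
      exact ih _ (le_trans hb (h1 ▸ le_max_left _ _))

lemma alt_eq_bbD (preds : List Int) : jungleBook1_alt preds = bbD preds :=
  fold_eq preds (List.range preds.length) 0 le_rfl

lemma bbD_nonneg (preds : List Int) : 0 ≤ bbD preds := by
  rw [bbD]
  exact (PySem.List.le_foldl_max_int (List.range preds.length) _ 0).1

lemma lt_bbD_iff (preds : List Int) (k : Nat) :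
    (k : Int) < bbD preds ↔ ∃ i, chainP preds k i := by
  constructor
  · intro hk
    have hmem : bbD preds = 0 ∨ bbD preds ∈ (List.range preds.length).map
        (fun (j : Nat) => (bWalk preds preds.length (j : Int) 1).getD 0) := by
      have : bbD preds = ((List.range preds.length).map
          (fun (j : Nat) => (bWalk preds preds.length (j : Int) 1).getD 0)).foldl max 0 :=
        (List.foldl_map (f := fun (j : Nat) => (bWalk preds preds.length (j : Int) 1).getD 0)
          (g := fun (x y : Int) => max x y) (l := List.range preds.length) (init := 0)).symm
      rw [this]
      exact PySem.List.foldl_max_mem _ 0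
    rcases hmem with h0 | hm
    · omega
    · simp only [List.mem_map, List.mem_range] at hm
      obtain ⟨j, hj, hv⟩ := hm
      rcases wval_spec preds j hj with ⟨m, hm, hw⟩ | ⟨_, hw⟩
      · rw [← hv, hw] at hk
        have hkm : k ≤ m := by omega
        exact chainP_descend hm k hkm
      · omega
  · rintro ⟨i, hi⟩
    have hb := chainP_bounds hi
    have hj : i.toNat < preds.length := by omega
    have hcast : ((i.toNat : Nat) : Int) = i := by omega
    have hle := (PySem.List.le_foldl_max_int (List.range preds.length)
      (fun (j : Nat) => (bWalk preds preds.length (j : Int) 1).getD 0) 0).2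
      i.toNat (List.mem_range.mpr hj)
    rcases wval_spec preds i.toNat hj with ⟨m, hm, hw⟩ | ⟨hno, _⟩
    · rw [hcast] at hm
      have := chainP_unique hi hm
      subst this
      rw [hw] at hle
      rw [bbD] at *
      omega
    · exact absurd (hcast ▸ hi) (hno k)

lemma bbD_le_length (preds : List Int) : bbD preds ≤ preds.length := by
  have hmem : bbD preds = 0 ∨ bbD preds ∈ (List.range preds.length).map
      (fun (j : Nat) => (bWalk preds preds.length (j : Int) 1).getD 0) := by
    have : bbD preds = ((List.range preds.length).map
        (fun (j : Nat) => (bWalk preds preds.length (j : Int) 1).getD 0)).foldl max 0 :=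
      (List.foldl_map (f := fun (j : Nat) => (bWalk preds preds.length (j : Int) 1).getD 0)
        (g := fun (x y : Int) => max x y) (l := List.range preds.length) (init := 0)).symm
    rw [this]
    exact PySem.List.foldl_max_mem _ 0
  rcases hmem with h0 | hm
  · rw [h0]; positivity
  · simp only [List.mem_map, List.mem_range] at hm
    obtain ⟨j, hj, hv⟩ := hm
    rcases wval_spec preds j hj with ⟨m, hm', hw⟩ | ⟨_, hw⟩
    · have := chainP_lt_length hm'
      rw [← hv, hw]
      omega
    · rw [← hv, hw]; positivity

lemma jbInner_eq (m : PySem.Dict Int (List Int)) : ∀ (size : Nat) (q : List Int),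
    size ≤ q.length →
    jbInner m size q = q.drop size ++ (q.take size).flatMap (fun e => m.getD e []) := by
  intro size
  induction size with
  | zero => intro q _; simp [jbInner]
  | succ size ih =>
    intro q hq
    match q with
    | [] => simp at hq
    | ele :: rest =>
      have hlen : size ≤ rest.length := by simpa using hq
      have hqueue : (if m.contains ele then rest ++ m.getD ele [] else rest)
          = rest ++ m.getD ele [] := by
        by_cases h : m.contains ele
        · rw [if_pos h]
        · rw [if_neg h, PySem.Dict.getD_of_not_contains m [] (by simpa using h), List.append_nil]
      rw [jbInner, hqueue, ih _ (by simp; omega)]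
      rw [List.drop_append_of_le_length hlen, List.take_append_of_le_length hlen]
      simp [List.flatMap_cons, List.append_assoc]

lemma jbInner_full (m : PySem.Dict Int (List Int)) (q : List Int) :
    jbInner m q.length q = q.flatMap (fun e => m.getD e []) := by
  rw [jbInner_eq m q.length q le_rfl]
  simp

lemma jbOuter_eq (preds : List Int) : ∀ (fuel k : Nat),
    bbD preds ≤ (k : Int) + fuel →
    jbOuter (makeMap preds) fuel (Lev preds k) = max (bbD preds - k) 0 := by
  intro fuel
  induction fuel with
  | zero =>
    intro k hk
    simp only [Nat.cast_zero, add_zero] at hk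
    rw [jbOuter]
    omega
  | succ fuel ih =>
    intro k hk
    by_cases hq : Lev preds k = []
    · have hnone : ¬ (k : Int) < bbD preds := by
        rw [lt_bbD_iff]
        rintro ⟨i, hi⟩
        exact (List.eq_nil_iff_forall_not_mem.mp hq i) ((mem_Lev preds k i).mpr hi)
      rw [jbOuter, hq]
      simp only [List.length_nil, gt_iff_lt, lt_self_iff_false, if_false]
      omega
    · have hpos : (Lev preds k).length > 0 := List.length_pos_iff.mpr hq
      obtain ⟨i, hi⟩ := List.exists_mem_of_ne_nil _ hq
      have hlt : (k : Int) < bbD preds := (lt_bbD_iff preds k).mpr ⟨i, (mem_Lev preds k i).mp hi⟩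
      rw [jbOuter, if_pos hpos, jbInner_full, show (Lev preds k).flatMap (fun e => (makeMap preds).getD e []) = Lev preds (k + 1) from rfl]
      rw [ih (k + 1) (by push_cast; push_cast at hk; omega)]
      push_cast
      omega

-- ===== VERDICT (by name: the statement is the Claim_ definition above) =====
theorem jungleBook1_spec : Claim_equal_jungleBook1 := by
  intro preds _
  show jbOuter (makeMap preds) (preds.length + 1) ([] ++ (makeMap preds).getD (-1) []) = jungleBook1_alt preds
  have h := jbOuter_eq preds (preds.length + 1) 0 (by push_cast; have := bbD_le_length preds; omega)
  simp only [Nat.cast_zero, sub_zero] at h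
  rw [show ([] ++ (makeMap preds).getD (-1) [] : List Int) = Lev preds 0 from by simp [Lev]]
  rw [h, alt_eq_bbD, max_eq_left (bbD_nonneg preds)]
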